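-- pv_equiv track=rewrite | github.com/yujeonghyeop/progrramers | Level1/Level1.math/math.py | solution
-- ===== SOURCE A (Python) =====
-- def solution(answers):
--     answer=[]
--     grade=[0,0,0]
--     s1 = [1,2,3,4,5]
--     s2 = [2,1,2,3,2,4,2,5]
--     s3 = [3,3,1,1,2,2,4,4,5,5]
--     for i in range(0,len(answers)):
--         if answers[i]==s1[i%5]:
--             grade[0] += 1
--         if answers[i] == s2[i%8]:
--             grade[1] += 1
--         if answers[i] == s3[i%10]:
--             grade[2] += 1
--     maxvalue = grade[0]
--     for i in range(0,len(grade)):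
--         if maxvalue <= grade[i]:
--             maxvalue = grade[i]
--     for i in range(0,len(grade)):
--         if maxvalue == grade[i]:
--             answer.append(i+1)
--     return answer
-- ===== SOURCE B (Python) =====
-- def solution(answers):
--     # Histogram approach: the three patterns repeat with period lcm(5,8,10)=40,
--     # so one pass builds a count of (position mod 40, answer) pairs; each
--     # supporter's score is then a fixed 40-term table lookup sum.
--     hist = {}
--     for i, a in enumerate(answers):
--         key = (i % 40, a)
--         hist[key] = hist.get(key, 0) + 1
--     patterns = [[1, 2, 3, 4, 5],
--                 [2, 1, 2, 3, 2, 4, 2, 5],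
--                 [3, 3, 1, 1, 2, 2, 4, 4, 5, 5]]
--     scores = [sum(hist.get((j, p[j % len(p)]), 0) for j in range(40)) for p in patterns]
--     best = max(scores)
--     return [k + 1 for k in range(3) if scores[k] == best]
-- ===== Notes on version B (the rewrite author's own statement) =====
-- stated objective: alternative
-- what changed: A compares every answer against all three cyclic patterns in one interleaved loop with manual max tracking; B instead builds a histogram of (index mod 40, answer) pairs in one pass (40 = lcm of the pattern periods) and computes each supporter's score as a fixed 40-term sum of table lookups, then max/collect.
import Mathlib
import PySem

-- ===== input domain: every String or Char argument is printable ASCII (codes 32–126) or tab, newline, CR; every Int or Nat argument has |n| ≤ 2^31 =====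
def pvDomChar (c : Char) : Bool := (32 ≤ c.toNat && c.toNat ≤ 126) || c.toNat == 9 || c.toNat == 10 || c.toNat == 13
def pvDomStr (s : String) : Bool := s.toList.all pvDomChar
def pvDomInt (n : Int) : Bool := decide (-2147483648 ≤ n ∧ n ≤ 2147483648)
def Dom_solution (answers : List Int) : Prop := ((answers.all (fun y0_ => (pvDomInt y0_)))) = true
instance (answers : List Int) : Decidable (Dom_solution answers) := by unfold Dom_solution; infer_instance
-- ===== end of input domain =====

-- B replaces A's interleaved pattern-matching loop by a one-pass histogram of
-- (index mod 40, answer) pairs (40 = lcm of the pattern periods) from which each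
-- supporter's score is a fixed 40-term table-lookup sum (objective: alternative).

-- ===== PORT A =====
def solution (answers : List Int) : List Int :=
  let s1 : List Int := [1,2,3,4,5]
  let s2 : List Int := [2,1,2,3,2,4,2,5]
  let s3 : List Int := [3,3,1,1,2,2,4,4,5,5]
  let grade :=
    (PySem.List.pyRange 0 (answers.length : Int) 1).foldl
      (fun (g : Int × Int × Int) i =>
        let a := PySem.List.pyGetD answers i 0
        let g0 := if a = PySem.List.pyGetD s1 (PySem.Int.mod i 5) 0 then g.1 + 1 else g.1
        let g1 := if a = PySem.List.pyGetD s2 (PySem.Int.mod i 8) 0 then g.2.1 + 1 else g.2.1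
        let g2 := if a = PySem.List.pyGetD s3 (PySem.Int.mod i 10) 0 then g.2.2 + 1 else g.2.2
        (g0, g1, g2)) (0, 0, 0)
  let gradeL : List Int := [grade.1, grade.2.1, grade.2.2]
  let maxvalue :=
    (PySem.List.pyRange 0 3 1).foldl
      (fun m i => if m ≤ PySem.List.pyGetD gradeL i 0 then PySem.List.pyGetD gradeL i 0 else m)
      grade.1
  (PySem.List.pyRange 0 3 1).foldl
    (fun acc i => if maxvalue = PySem.List.pyGetD gradeL i 0 then acc ++ [i + 1] else acc)
    ([] : List Int)

-- ===== PORT B =====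
def solution_alt (answers : List Int) : List Int :=
  let hist : PySem.Dict (Int × Int) Int :=
    (PySem.List.enumerate answers 0).foldl
      (fun d ia =>
        let key := (PySem.Int.mod ia.1 40, ia.2)
        d.insert key (d.getD key 0 + 1))
      PySem.Dict.empty
  let patterns : List (List Int) :=
    [[1,2,3,4,5], [2,1,2,3,2,4,2,5], [3,3,1,1,2,2,4,4,5,5]]
  let scores := patterns.map (fun p =>
    ((PySem.List.pyRange 0 40 1).map
      (fun j => hist.getD (j, PySem.List.pyGetD p (PySem.Int.mod j (p.length : Int)) 0) 0)).sum)
  let best := (PySem.List.max? scores (fun y => y)).getD 0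
  ((PySem.List.pyRange 0 3 1).filter
    (fun k => PySem.List.pyGetD scores k 0 == best)).map (fun k => k + 1)

-- ===== PRECONDITION & SPEC =====
def Spec_solution (answers : List Int) (out : List Int) : Prop := out = solution_alt answers
instance (answers : List Int) (out : List Int) : Decidable (Spec_solution answers out) := by unfold Spec_solution; infer_instance

-- ===== CLAIM (what is proved, stated in full; the proofs are below) =====
def Claim_equal_solution : Prop := ∀ (answers : List Int), Dom_solution answers → Spec_solution answers (solution answers)

-- ===== LEMMAS AND PROOFS =====

-- A's 'for i in range(len(xs)): … xs[i] …' loop is the fold over enumerate(xs).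
theorem foldl_range_getD_enumerate {γ : Type} (full : List Int) (F : γ → Int → Int → γ) :
    ∀ (ys : List Int) (k : Nat) (g : γ), full.drop k = ys →
      (PySem.List.pyRange (k : Int) (full.length : Int) 1).foldl
          (fun g i => F g i (PySem.List.pyGetD full i 0)) g
        = (PySem.List.enumerate ys (k : Int)).foldl (fun g ia => F g ia.1 ia.2) g := by
  intro ys
  induction ys with
  | nil =>
    intro k g h
    have hk : (full.length : Int) ≤ (k : Int) := by
      have := List.drop_eq_nil_iff.mp h
      exact_mod_cast this
    rw [PySem.List.pyRange_one_eq_nil hk]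
    simp [PySem.List.enumerate]
  | cons y ys ih =>
    intro k g h
    have hk : k < full.length := by
      by_contra hc
      rw [List.drop_eq_nil_of_le (by omega)] at h
      simp at h
    have hy : full[k] = y := by
      have h0 : (full.drop k)[0]? = some y := by rw [h]; rfl
      rw [List.getElem?_drop] at h0
      have := List.getElem?_eq_getElem (l := full) (i := k + 0) (by omega)
      rw [this] at h0
      simpa using h0
    have hget : PySem.List.pyGetD full (k : Int) 0 = y := by
      rw [PySem.List.pyGetD_natCast]
      simp [hk, hy]
    have hdrop : full.drop (k + 1) = ys := by
      have := congrArg (List.drop 1) h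
      simpa [List.drop_drop, Nat.add_comm] using this
    rw [PySem.List.pyRange_one_cons (by exact_mod_cast hk)]
    simp only [List.foldl_cons, PySem.List.enumerate_cons, hget]
    rw [show ((k : Int) + 1) = ((k + 1 : Nat) : Int) by push_cast; ring]
    exact ih (k + 1) _ hdrop

-- The interleaved triple-counter fold equals three independent indicator sums.
theorem grade_fold_eq :
    ∀ (l : List (Int × Int)) (g : Int × Int × Int),
      l.foldl (fun (g : Int × Int × Int) ia =>
          ((if ia.2 = PySem.List.pyGetD [1,2,3,4,5] (PySem.Int.mod ia.1 5) 0 then g.1 + 1 else g.1),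
           (if ia.2 = PySem.List.pyGetD [2,1,2,3,2,4,2,5] (PySem.Int.mod ia.1 8) 0 then g.2.1 + 1 else g.2.1),
           (if ia.2 = PySem.List.pyGetD [3,3,1,1,2,2,4,4,5,5] (PySem.Int.mod ia.1 10) 0 then g.2.2 + 1 else g.2.2))) g
        = (g.1 + (l.map (fun ia => if ia.2 = PySem.List.pyGetD [1,2,3,4,5] (PySem.Int.mod ia.1 5) 0 then (1:Int) else 0)).sum,
           g.2.1 + (l.map (fun ia => if ia.2 = PySem.List.pyGetD [2,1,2,3,2,4,2,5] (PySem.Int.mod ia.1 8) 0 then (1:Int) else 0)).sum,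
           g.2.2 + (l.map (fun ia => if ia.2 = PySem.List.pyGetD [3,3,1,1,2,2,4,4,5,5] (PySem.Int.mod ia.1 10) 0 then (1:Int) else 0)).sum) := by
  intro l
  induction l with
  | nil => intro g; simp
  | cons x xs ih =>
    intro g
    simp only [List.foldl_cons, List.map_cons, List.sum_cons, ih]
    refine Prod.ext ?_ (Prod.ext ?_ ?_) <;> dsimp <;> split_ifs <;> ring

-- Over a Nodup index list, the 0/1 sum selecting the unique matching index.
theorem sum_select (a : Int) (t : Int → Int) :
    ∀ (js : List Int), js.Nodup → ∀ (r : Int),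
      ((js.map (fun j => if (r, a) = (j, t j) then (1:Int) else 0)).sum
        = if r ∈ js ∧ a = t r then 1 else 0) := by
  intro js
  induction js with
  | nil => intro _ r; simp
  | cons j js ih =>
    intro hnd r
    have hnd' := (List.nodup_cons.mp hnd)
    rw [List.map_cons, List.sum_cons, ih hnd'.2 r]
    by_cases hrj : r = j
    · subst hrj
      simp [Prod.mk.injEq, hnd'.1]
    · simp [Prod.mk.injEq, hrj]

-- Sum of histogram counts over residues 0..39 = indicator sum over the pairs.
theorem sum_count_eq (t : Int → Int) :
    ∀ (l : List (Int × Int)), (∀ p ∈ l, 0 ≤ p.1 ∧ p.1 < 40) →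
      ((PySem.List.pyRange 0 40 1).map (fun j => ((l.count (j, t j) : Int)))).sum
        = (l.map (fun p => if p.2 = t p.1 then (1:Int) else 0)).sum := by
  intro l
  induction l with
  | nil => intro _; simp
  | cons x xs ih =>
    intro h
    have hx := h x (List.mem_cons_self)
    have hxs : ∀ p ∈ xs, 0 ≤ p.1 ∧ p.1 < 40 := fun p hp => h p (List.mem_cons_of_mem _ hp)
    have hcnt : ∀ j : Int, ((((x :: xs).count (j, t j) : Nat)) : Int)
        = (xs.count (j, t j) : Int) + (if (x.1, x.2) = (j, t j) then (1:Int) else 0) := by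
      intro j
      rw [List.count_cons]
      split_ifs with h1 h2 h3 <;> simp_all [beq_iff_eq]
    calc ((PySem.List.pyRange 0 40 1).map (fun j => (((x :: xs).count (j, t j) : Nat) : Int))).sum
        = ((PySem.List.pyRange 0 40 1).map (fun j =>
            (xs.count (j, t j) : Int) + (if (x.1, x.2) = (j, t j) then (1:Int) else 0))).sum := by
          exact congrArg List.sum (List.map_congr_left (fun j _ => hcnt j))
      _ = ((PySem.List.pyRange 0 40 1).map (fun j => (xs.count (j, t j) : Int))).sum
          + ((PySem.List.pyRange 0 40 1).map (fun j => if (x.1, x.2) = (j, t j) then (1:Int) else 0)).sum := by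
          exact PySem.List.sum_map_add_int _ _ _
      _ = ((x :: xs).map (fun p => if p.2 = t p.1 then (1:Int) else 0)).sum := by
          rw [ih hxs, sum_select x.2 t _ (by decide) x.1]
          have hmem : x.1 ∈ PySem.List.pyRange 0 40 1 := by
            rw [PySem.List.mem_pyRange_one]; exact ⟨hx.1, hx.2⟩
          simp only [List.map_cons, List.sum_cons, hmem, true_and]
          ring

-- Python's i % 40 % len = i % len for the pattern periods (len divides 40).
theorem mod40_mod (i : Int) (len : Int) (hpos : 0 < len) (hdvd : len ∣ 40) :
    PySem.Int.mod (PySem.Int.mod i 40) len = PySem.Int.mod i len := by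
  rw [PySem.Int.mod_eq_emod_of_pos hpos, PySem.Int.mod_eq_emod_of_pos hpos,
      PySem.Int.mod_eq_emod_of_pos (show (0:Int) < 40 by norm_num)]
  exact Int.emod_emod_of_dvd i hdvd

-- The max-tracking loop plus collect equals B's max?/filter over the same scores.
theorem final_eq (c1 c2 c3 : Int) :
    (PySem.List.pyRange 0 3 1).foldl
      (fun acc i =>
        if ((PySem.List.pyRange 0 3 1).foldl
              (fun m i => if m ≤ PySem.List.pyGetD [c1,c2,c3] i 0
                          then PySem.List.pyGetD [c1,c2,c3] i 0 else m) c1)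
            = PySem.List.pyGetD [c1,c2,c3] i 0
        then acc ++ [i + 1] else acc) ([] : List Int)
  = ((PySem.List.pyRange 0 3 1).filter
      (fun k => PySem.List.pyGetD [c1,c2,c3] k 0
                  == (PySem.List.max? [c1,c2,c3] (fun y => y)).getD 0)).map
      (fun k => k + 1) := by
  have h3 : PySem.List.pyRange 0 3 1 = [0, 1, 2] := by decide
  rw [h3]
  simp only [List.foldl_cons, List.foldl_nil, List.filter_cons, List.filter_nil,
    PySem.List.max?_id_cons, Option.getD_some,
    PySem.List.pyGetD, PySem.List.pyGet?, PySem.List.pyIdx?, beq_iff_eq,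
    show ((2:Int).toNat) = 2 from rfl, show ((1:Int).toNat) = 1 from rfl,
    show ((0:Int).toNat) = 0 from rfl]
  norm_num
  split_ifs <;> first | (exfalso; omega) | simp

-- B's histogram getD is a count over the mapped (index mod 40, answer) pairs.
theorem hist_getD (answers : List Int) (v : Int × Int) :
    ((PySem.List.enumerate answers 0).foldl
        (fun (d : PySem.Dict (Int × Int) Int) ia =>
          let key := (PySem.Int.mod ia.1 40, ia.2)
          d.insert key (d.getD key 0 + 1)) PySem.Dict.empty).getD v 0
      = (((PySem.List.enumerate answers 0).map
            (fun ia => (PySem.Int.mod ia.1 40, ia.2))).count v : Int) := by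
  rw [show (fun (d : PySem.Dict (Int × Int) Int) (ia : Int × Int) =>
        let key := (PySem.Int.mod ia.1 40, ia.2)
        d.insert key (d.getD key 0 + 1))
      = (fun d ia => (fun (d : PySem.Dict (Int × Int) Int) x => d.insert x (d.getD x 0 + 1)) d
          ((fun (ia : Int × Int) => (PySem.Int.mod ia.1 40, ia.2)) ia)) from rfl,
    ← List.foldl_map (f := fun (ia : Int × Int) => (PySem.Int.mod ia.1 40, ia.2))
        (g := fun (d : PySem.Dict (Int × Int) Int) x => d.insert x (d.getD x 0 + 1)),
    PySem.Dict.getD_foldl_insert_add_one, PySem.Dict.getD_empty, zero_add]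

-- One supporter's 40-term table-lookup sum equals the direct indicator sum.
theorem score_eq (answers : List Int) (p : List Int)
    (hpos : 0 < (p.length : Int)) (hdvd : (p.length : Int) ∣ 40) :
    ((PySem.List.pyRange 0 40 1).map
        (fun j => (((PySem.List.enumerate answers 0).map
            (fun ia => (PySem.Int.mod ia.1 40, ia.2))).count
              (j, PySem.List.pyGetD p (PySem.Int.mod j (p.length : Int)) 0) : Int))).sum
      = ((PySem.List.enumerate answers 0).map
          (fun ia => if ia.2 = PySem.List.pyGetD p (PySem.Int.mod ia.1 (p.length : Int)) 0
                     then (1:Int) else 0)).sum := by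
  rw [sum_count_eq (fun j => PySem.List.pyGetD p (PySem.Int.mod j (p.length : Int)) 0) _
        (by
          intro q hq
          rw [List.mem_map] at hq
          obtain ⟨ia, _, rfl⟩ := hq
          exact ⟨PySem.Int.mod_nonneg _ (by norm_num), PySem.Int.mod_lt _ (by norm_num)⟩),
      List.map_map]
  apply congrArg List.sum
  apply List.map_congr_left
  intro ia _
  simp only [Function.comp]
  rw [mod40_mod ia.1 _ hpos hdvd]

-- ===== VERDICT (by name: the statement is the Claim_ definition above) =====
theorem solution_spec : Claim_equal_solution := by
  intro answers _
  simp only [Spec_solution, solution, solution_alt]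
  have hA := foldl_range_getD_enumerate (full := answers)
      (F := fun (g : Int × Int × Int) i a =>
        ((if a = PySem.List.pyGetD [1,2,3,4,5] (PySem.Int.mod i 5) 0 then g.1 + 1 else g.1),
         (if a = PySem.List.pyGetD [2,1,2,3,2,4,2,5] (PySem.Int.mod i 8) 0 then g.2.1 + 1 else g.2.1),
         (if a = PySem.List.pyGetD [3,3,1,1,2,2,4,4,5,5] (PySem.Int.mod i 10) 0 then g.2.2 + 1 else g.2.2)))
      answers 0 ((0:Int),(0:Int),(0:Int)) rfl
  push_cast at hA
  rw [hA, grade_fold_eq]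
  simp only [List.map_cons, List.map_nil, List.length_cons, List.length_nil, zero_add]
  have hs1 := score_eq answers [1,2,3,4,5] (by norm_num) (by norm_num)
  have hs2 := score_eq answers [2,1,2,3,2,4,2,5] (by norm_num) (by norm_num)
  have hs3 := score_eq answers [3,3,1,1,2,2,4,4,5,5] (by norm_num) (by norm_num)
  simp only [hist_getD]
  norm_num at hs1 hs2 hs3 ⊢
  rw [hs1, hs2, hs3]
  exact final_eq _ _ _
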